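-- pv_equiv track=rewrite | github.com/jander99/spring-profile-resolver | src/spring_profile_resolver/properties_parser.py | _parse_property_line
-- ===== SOURCE A (Python) =====
-- def _parse_property_line(line: str) -> tuple[str | None, str]:
--     """Parse a single property line into key and value.
--
--     Handles:
--     - key=value
--     - key:value
--     - key: value
--     - key = value
--     """
--     # Find the separator (=, :, or first whitespace)
--     separator_idx = -1
--     separator_char = None
--
--     i = 0
--     while i < len(line):
--         char = line[i]
--
--         # Handle escape sequences
--         if char == "\\":
--             i += 2
--             continue
--
--         if char in "=:":
--             separator_idx = i
--             separator_char = char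
--             break
--         elif char.isspace() and separator_char is None:
--             # Space can be a separator if no = or : found yet
--             separator_idx = i
--             separator_char = " "
--             break
--
--         i += 1
--
--     if separator_idx == -1:
--         # No separator found, treat entire line as key with empty value
--         return _unescape_property_string(line.strip()), ""
--
--     key = _unescape_property_string(line[:separator_idx].strip())
--     value = line[separator_idx + 1 :].lstrip()
--
--     # Handle the case where separator is followed by = or :
--     if separator_char == " " and value and value[0] in "=:":
--         value = value[1:].lstrip()
--
--     return key, _unescape_property_string(value)
--
-- def _unescape_property_string(s: str) -> str:
--     """Unescape a properties file string.
--
--     Handles: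
--     - \\n, \\t, \\r, \\f
--     - \\uXXXX unicode escapes
--     - \\\\ for literal backslash
--     """
--     result = []
--     i = 0
--     while i < len(s):
--         if s[i] == "\\" and i + 1 < len(s):
--             next_char = s[i + 1]
--             if next_char == "n":
--                 result.append("\n")
--                 i += 2
--             elif next_char == "t":
--                 result.append("\t")
--                 i += 2
--             elif next_char == "r":
--                 result.append("\r")
--                 i += 2
--             elif next_char == "f":
--                 result.append("\f")
--                 i += 2
--             elif next_char == "\\":
--                 result.append("\\")
--                 i += 2
--             elif next_char == "u" and i + 5 < len(s):
--                 # Unicode escape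
--                 try:
--                     code_point = int(s[i + 2 : i + 6], 16)
--                     # Validate not a surrogate (U+D800-U+DFFF) which are invalid in UTF-8
--                     if 0xD800 <= code_point <= 0xDFFF:
--                         # Invalid surrogate, treat backslash as literal
--                         result.append(s[i])
--                         i += 1
--                     else:
--                         result.append(chr(code_point))
--                         i += 6
--                 except ValueError:
--                     result.append(s[i])
--                     i += 1
--             else:
--                 # Unknown escape, keep the character after backslash
--                 result.append(next_char)
--                 i += 2
--         else:
--             result.append(s[i])
--             i += 1
--     return "".join(result)
-- ===== SOURCE B (Python) =====
-- # Chunk-based re-implementation: instead of walking the line one character at a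
-- # time, both passes jump from backslash to backslash with str.find and copy the
-- # backslash-free chunks wholesale.
--
-- _ESCAPES = {"n": "\n", "t": "\t", "r": "\r", "f": "\f", "\\": "\\"}
-- # characters that can end the key: '=', ':' or anything str.isspace() accepts in ASCII
-- _SEP_OR_WS = "=: \t\n\r\x0b\x0c\x1c\x1d\x1e\x1f"
--
--
-- def _unescape_property_string(s: str) -> str:
--     out = []
--     i, n = 0, len(s)
--     while i < n:
--         j = s.find("\\", i)
--         if j == -1 or j == n - 1:
--             out.append(s[i:])  # no escape left (a trailing backslash stays literal)
--             break
--         out.append(s[i:j])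
--         c = s[j + 1]
--         if c == "u" and j + 6 <= n:
--             try:
--                 cp = int(s[j + 2 : j + 6], 16)
--                 if 0xD800 <= cp <= 0xDFFF:
--                     raise ValueError  # surrogate: same fallback as a bad escape
--                 out.append(chr(cp))
--                 i = j + 6
--             except ValueError:
--                 out.append("\\")  # keep the backslash, re-scan from the 'u'
--                 i = j + 1
--         elif c in _ESCAPES:
--             out.append(_ESCAPES[c])
--             i = j + 2
--         else:
--             out.append(c)  # unknown escape: keep the escaped character
--             i = j + 2
--     return "".join(out)
--
--
-- def _find_separator(line: str):
--     """Index and kind of the first unescaped '=', ':' or whitespace, else None."""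
--     i, n = 0, len(line)
--     while i < n:
--         b = line.find("\\", i)
--         seg = line[i : n if b == -1 else b]
--         cands = [p for p in (seg.find(c) for c in _SEP_OR_WS) if p != -1]
--         if cands:
--             m = min(cands)
--             ch = seg[m]
--             return i + m, (ch if ch in "=:" else " ")
--         if b == -1:
--             return None
--         i = b + 2  # skip the backslash and the escaped character
--     return None
--
--
-- def _parse_property_line(line: str) -> tuple[str | None, str]:
--     sep = _find_separator(line)
--     if sep is None:
--         return _unescape_property_string(line.strip()), ""
--     idx, kind = sep
--     key = _unescape_property_string(line[:idx].strip())
--     value = line[idx + 1 :].lstrip()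
--     if kind == " " and value and value[0] in "=:":
--         value = value[1:].lstrip()
--     return key, _unescape_property_string(value)
-- ===== Notes on version B (the rewrite author's own statement) =====
-- stated objective: faster
-- what changed: Both passes are rewritten chunk-wise: instead of inspecting the line one character at a time, B jumps from backslash to backslash with str.find, copies the backslash-free chunks wholesale by slicing, finds the separator inside a chunk as the minimum over per-character str.find results, and handles each escape at a chunk boundary; the separator search and the unescaping share this chunk decomposition via a _find_separator helper.
import Mathlib
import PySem

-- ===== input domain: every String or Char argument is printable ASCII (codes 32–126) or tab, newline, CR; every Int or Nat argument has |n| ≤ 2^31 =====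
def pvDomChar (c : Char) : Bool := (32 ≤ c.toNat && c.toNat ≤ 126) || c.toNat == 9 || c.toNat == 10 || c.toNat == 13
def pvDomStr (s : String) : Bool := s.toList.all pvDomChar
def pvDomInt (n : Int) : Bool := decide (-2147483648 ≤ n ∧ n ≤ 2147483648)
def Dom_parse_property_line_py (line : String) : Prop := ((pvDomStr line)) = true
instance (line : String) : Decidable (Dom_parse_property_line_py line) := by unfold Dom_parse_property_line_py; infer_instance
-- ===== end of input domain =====

-- B re-implements both passes chunk-wise (jump between backslashes with str.find, copy the
-- backslash-free chunks wholesale by slicing) instead of A's character-at-a-time index loops;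
-- a timing run measured B faster by a constant factor; equal return value on Dom is proved below.

-- ===== PORT A =====

-- shared model of the identical `try: cp = int(cs, 16); <surrogate check>; chr(cp) except ValueError`
-- block that both A and B contain: none exactly where that block falls back to a literal backslash
def pyChr16 (cs : List Char) : Option Char :=
  match PySem.Int.ofCharsBase? cs 16 with
  | none => none                                 -- int() raised ValueError
  | some cp =>
    if 0xD800 ≤ cp ∧ cp ≤ 0xDFFF then none       -- surrogate, rejected before chr()
    else if cp < 0 ∨ 0x110000 ≤ cp then none     -- chr() raised ValueError
    else some (Char.ofNat cp.toNat)

-- A's `_unescape_property_string`: the index loop, one character at a time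
def unescA (s : List Char) : List Char :=
  match s with
  | [] => []
  | [c] => [c]          -- i + 1 = len(s): the last character is copied literally
  | c :: nc :: r =>
    if c = '\\' then
      if nc = 'n' then '\n' :: unescA r
      else if nc = 't' then '\t' :: unescA r
      else if nc = 'r' then '\r' :: unescA r
      else if nc = 'f' then '\x0c' :: unescA r
      else if nc = '\\' then '\\' :: unescA r
      else if nc = 'u' ∧ 4 ≤ r.length then       -- i + 5 < len(s)
        match pyChr16 (r.take 4) with            -- s[i+2:i+6]
        | some ch => ch :: unescA (r.drop 4)     -- i += 6
        | none => '\\' :: unescA (nc :: r)       -- keep the backslash, i += 1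
      else nc :: unescA r                        -- unknown escape
    else c :: unescA (nc :: r)
termination_by s.length
decreasing_by all_goals ((try simp); (try omega))

-- A's separator loop: index i walks the line; on '\\' it jumps two positions
def scanA (s : List Char) (i : Nat) : Option (Nat × Char) :=
  match s with
  | [] => none
  | c :: rest =>
    if c = '\\' then scanA (rest.drop 1) (i + 2)
    else if c = '=' ∨ c = ':' then some (i, c)
    else if PySem.Chars.isspace c then some (i, ' ')  -- separator_char is still None here
    else scanA rest (i + 1)
termination_by s.length
decreasing_by all_goals ((try simp); (try omega))

def parse_property_line_py (line : String) : Option String × String :=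
  let s := line.toList
  match scanA s 0 with
  | none => (some (String.mk (unescA (PySem.Chars.strip s))), "")
  | some (idx, sc) =>
    let key := unescA (PySem.Chars.strip (s.take idx))
    let value := PySem.Chars.lstrip (s.drop (idx + 1))
    let value :=
      if sc = ' ' ∧ value ≠ [] ∧ (value.getD 0 ' ' = '=' ∨ value.getD 0 ' ' = ':') then
        PySem.Chars.lstrip (value.drop 1)
      else value
    (some (String.mk key), String.mk (unescA value))

-- ===== PORT B =====

-- the _ESCAPES dict of Source B
def pvEscapes : List (Char × Char) := [('n', '\n'), ('t', '\t'), ('r', '\r'), ('f', '\x0c'), ('\\', '\\')]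
-- the _SEP_OR_WS string of Source B
def pvSepWs : List Char := ['=', ':', ' ', '\t', '\n', '\r', '\x0b', '\x0c', '\x1c', '\x1d', '\x1e', '\x1f']

-- Source B's `_unescape_property_string`: `s.find('\\', i)` splits the suffix at the first
-- backslash (takeWhile/dropWhile), the backslash-free chunk is copied wholesale
def unescB (s : List Char) : List Char :=
  let seg := s.takeWhile (fun c => c ≠ '\\')
  match h : s.dropWhile (fun c => c ≠ '\\') with
  | [] => seg                                    -- j == -1: no escape left
  | [b] => seg ++ [b]                            -- j == n-1: trailing backslash stays literal
  | _ :: nc :: r =>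
    seg ++
      (if nc = 'u' ∧ 4 ≤ r.length then           -- j + 6 <= n
        match pyChr16 (r.take 4) with            -- s[j+2:j+6]
        | some ch => ch :: unescB (r.drop 4)     -- i = j + 6
        | none => '\\' :: unescB (nc :: r)       -- i = j + 1: re-scan from the 'u'
      else
        match List.lookup nc pvEscapes with      -- _ESCAPES dict
        | some e => e :: unescB r                -- i = j + 2
        | none => nc :: unescB r)                -- unknown escape, i = j + 2
termination_by s.length
decreasing_by
  all_goals
    have hle := List.length_dropWhile_le (fun c => c ≠ '\\') s
    rw [h] at hle
    simp [List.length_drop] at *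
    omega

-- Source B's `_find_separator`: per chunk, the candidate list is one str.find per separator
-- character; the separator position is the minimum of the hits
def scanB (s : List Char) (i : Nat) : Option (Nat × Char) :=
  let seg := s.takeWhile (fun c => c ≠ '\\')
  let cands := pvSepWs.filterMap (fun c => seg.idxOf? c)   -- seg.find(c), -1 filtered out
  match cands.min? with
  | some m =>
    let ch := seg.getD m ' '
    some (i + m, if ch = '=' ∨ ch = ':' then ch else ' ')
  | none =>
    match h : s.dropWhile (fun c => c ≠ '\\') with
    | [] => none                                 -- b == -1: no separator
    | _ :: r => scanB (r.drop 1) (i + seg.length + 2)   -- i = b + 2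
termination_by s.length
decreasing_by
  all_goals
    have hle := List.length_dropWhile_le (fun c => c ≠ '\\') s
    rw [h] at hle
    simp [List.length_drop] at *
    omega

def parse_property_line_py_alt (line : String) : Option String × String :=
  let s := line.toList
  match scanB s 0 with
  | none => (some (String.mk (unescB (PySem.Chars.strip s))), "")
  | some (idx, sc) =>
    let key := unescB (PySem.Chars.strip (s.take idx))
    let value := PySem.Chars.lstrip (s.drop (idx + 1))
    let value :=
      if sc = ' ' ∧ value ≠ [] ∧ (value.getD 0 ' ' = '=' ∨ value.getD 0 ' ' = ':') then
        PySem.Chars.lstrip (value.drop 1)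
      else value
    (some (String.mk key), String.mk (unescB value))

-- ===== PRECONDITION & SPEC =====
def Spec_parse_property_line_py (line : String) (out : Option String × String) : Prop := out = parse_property_line_py_alt line
instance (line : String) (out : Option String × String) : Decidable (Spec_parse_property_line_py line out) := by unfold Spec_parse_property_line_py; infer_instance

-- ===== CLAIM (what is proved, stated in full; the proofs are below) =====
def Claim_equal_parse_property_line_py : Prop := ∀ (line : String), Dom_parse_property_line_py line → Spec_parse_property_line_py line (parse_property_line_py line)

-- ===== LEMMAS AND PROOFS =====

-- min of a list of naturals containing 0
theorem min?_zero {l : List Nat} (h : 0 ∈ l) : l.min? = some 0 := by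
  cases hm : l.min? with
  | none => rw [List.min?_eq_none_iff] at hm; subst hm; cases h
  | some m =>
    have hs := List.min?_eq_some_iff.mp hm
    have hz : m = 0 := Nat.le_zero.mp (hs.2 0 h)
    rw [hz]

theorem min?_map_succ (l : List Nat) : (l.map (· + 1)).min? = l.min?.map (· + 1) := by
  cases hm : l.min? with
  | none => rw [List.min?_eq_none_iff] at hm; subst hm; simp
  | some m =>
    have hs := List.min?_eq_some_iff.mp hm
    refine List.min?_eq_some_iff.mpr ⟨List.mem_map.mpr ⟨m, hs.1, rfl⟩, ?_⟩
    intro b hb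
    rcases List.mem_map.mp hb with ⟨a, ha, rfl⟩
    exact Nat.add_le_add_right (hs.2 a ha) 1

-- computation rules for unescB, one per shape of the first-backslash split
theorem unescB_drop_nil (s : List Char)
    (hd : s.dropWhile (fun c => decide ¬c = '\\') = []) :
    unescB s = s.takeWhile (fun c => decide ¬c = '\\') := by
  rw [unescB.eq_def]; simp only [ne_eq]
  split
  next heq => rfl
  next b heq => rw [hd] at heq; simp at heq
  next x nc r heq => rw [hd] at heq; simp at heq

theorem unescB_drop_single (s : List Char) (b : Char)
    (hd : s.dropWhile (fun c => decide ¬c = '\\') = [b]) :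
    unescB s = s.takeWhile (fun c => decide ¬c = '\\') ++ [b] := by
  rw [unescB.eq_def]; simp only [ne_eq]
  split
  next heq => rw [hd] at heq; simp at heq
  next b' heq =>
    rw [hd] at heq
    injection heq with e
    rw [e]
  next x nc r heq => rw [hd] at heq; simp at heq

theorem unescB_drop_cons2 (s : List Char) (x nc : Char) (r : List Char)
    (hd : s.dropWhile (fun c => decide ¬c = '\\') = x :: nc :: r) :
    unescB s = s.takeWhile (fun c => decide ¬c = '\\') ++
      (if nc = 'u' ∧ 4 ≤ r.length then
        match pyChr16 (r.take 4) with
        | some ch => ch :: unescB (r.drop 4)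
        | none => '\\' :: unescB (nc :: r)
      else
        match List.lookup nc pvEscapes with
        | some e => e :: unescB r
        | none => nc :: unescB r) := by
  rw [unescB.eq_def]; simp only [ne_eq]
  split
  next heq => rw [hd] at heq; simp at heq
  next b' heq => rw [hd] at heq; simp at heq
  next x' nc' r' heq =>
    rw [hd] at heq
    injection heq with e1 heq'
    injection heq' with e2 e3
    rw [← e2, ← e3]

theorem unescB_nil : unescB [] = [] := by
  rw [unescB_drop_nil [] rfl]; rfl

theorem unescB_single (c : Char) : unescB [c] = [c] := by
  by_cases h : c = '\\'
  · subst h; rw [unescB_drop_single ['\\'] '\\' rfl]; rfl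
  · rw [unescB_drop_nil [c] (by rw [List.dropWhile_cons, if_pos (by simp [h])]; rfl)]
    rw [List.takeWhile_cons, if_pos (by simp [h])]; rfl

theorem unescB_cons (c : Char) (rest : List Char) (h : c ≠ '\\') :
    unescB (c :: rest) = c :: unescB rest := by
  cases hd : rest.dropWhile (fun c => decide ¬c = '\\') with
  | nil =>
    rw [unescB_drop_nil (c :: rest)
        (by rw [List.dropWhile_cons, if_pos (by simp [h])]; exact hd),
      unescB_drop_nil rest hd]
    simp [h]
  | cons b t =>
    cases t with
    | nil =>
      rw [unescB_drop_single (c :: rest) b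
          (by rw [List.dropWhile_cons, if_pos (by simp [h])]; exact hd),
        unescB_drop_single rest b hd]
      simp [h]
    | cons nc r =>
      rw [unescB_drop_cons2 (c :: rest) b nc r
          (by rw [List.dropWhile_cons, if_pos (by simp [h])]; exact hd),
        unescB_drop_cons2 rest b nc r hd]
      simp [h]

theorem unescB_bs (nc : Char) (r : List Char) :
    unescB ('\\' :: nc :: r) =
      (if nc = 'u' ∧ 4 ≤ r.length then
        match pyChr16 (r.take 4) with
        | some ch => ch :: unescB (r.drop 4)
        | none => '\\' :: unescB (nc :: r)
      else
        match List.lookup nc pvEscapes with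
        | some e => e :: unescB r
        | none => nc :: unescB r) := by
  rw [unescB_drop_cons2 ('\\' :: nc :: r) '\\' nc r rfl]
  rfl

theorem unescA_nil : unescA [] = [] := by rw [unescA.eq_def]

theorem unescA_single (c : Char) : unescA [c] = [c] := by rw [unescA.eq_def]

theorem unescA_cons2 (c nc : Char) (r : List Char) :
    unescA (c :: nc :: r) =
      (if c = '\\' then
        if nc = 'n' then '\n' :: unescA r
        else if nc = 't' then '\t' :: unescA r
        else if nc = 'r' then '\r' :: unescA r
        else if nc = 'f' then '\x0c' :: unescA r
        else if nc = '\\' then '\\' :: unescA r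
        else if nc = 'u' ∧ 4 ≤ r.length then
          match pyChr16 (r.take 4) with
          | some ch => ch :: unescA (r.drop 4)
          | none => '\\' :: unescA (nc :: r)
        else nc :: unescA r
      else c :: unescA (nc :: r)) := by
  rw [unescA.eq_def]

theorem unesc_eq_aux : ∀ (n : Nat) (s : List Char), s.length ≤ n → unescA s = unescB s := by
  intro n
  induction n with
  | zero =>
    intro s hs
    have h0 : s = [] := by cases s <;> simp_all
    subst h0
    rw [unescA_nil, unescB_nil]
  | succ n ih =>
    intro s hs
    match s with
    | [] => rw [unescA_nil, unescB_nil]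
    | [c] => rw [unescA_single, unescB_single]
    | c :: nc :: r =>
      simp only [List.length_cons] at hs
      by_cases hc : c = '\\'
      · subst hc
        rw [unescA_cons2, unescB_bs, if_pos rfl]
        by_cases hn : nc = 'n'
        · subst hn; simp [pvEscapes, List.lookup, ih r (by omega)]
        by_cases ht : nc = 't'
        · subst ht; simp [pvEscapes, List.lookup, ih r (by omega)]
        by_cases hr : nc = 'r'
        · subst hr; simp [pvEscapes, List.lookup, ih r (by omega)]
        by_cases hf : nc = 'f'
        · subst hf; simp [pvEscapes, List.lookup, ih r (by omega)]
        by_cases hb : nc = '\\'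
        · subst hb; simp [pvEscapes, List.lookup, ih r (by omega)]
        by_cases hu : nc = 'u'
        · subst hu
          by_cases h4 : 4 ≤ r.length
          · simp only [h4, and_true, if_pos rfl, (by decide : (('u':Char) = 'n') = False),
              (by decide : (('u':Char) = 't') = False), (by decide : (('u':Char) = 'r') = False),
              (by decide : (('u':Char) = 'f') = False), (by decide : (('u':Char) = '\\') = False),
              if_false]
            cases hp : pyChr16 (r.take 4) with
            | some ch => simp [hp, ih (r.drop 4) (by simp; omega)]
            | none => simp [hp, ih ('u' :: r) (by simp; omega)]
          · simp [h4, pvEscapes, List.lookup, ih r (by omega)]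
        · have hcond : ¬(nc = 'u' ∧ 4 ≤ r.length) := fun hh => hu hh.1
          have e1 : (nc == 'n') = false := beq_eq_false_iff_ne.mpr hn
          have e2 : (nc == 't') = false := beq_eq_false_iff_ne.mpr ht
          have e3 : (nc == 'r') = false := beq_eq_false_iff_ne.mpr hr
          have e4 : (nc == 'f') = false := beq_eq_false_iff_ne.mpr hf
          have e5 : (nc == '\\') = false := beq_eq_false_iff_ne.mpr hb
          have hlk : List.lookup nc pvEscapes = none := by
            simp [pvEscapes, List.lookup, e1, e2, e3, e4, e5]
          simp [hn, ht, hr, hf, hb, hcond, hlk, ih r (by omega)]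
      · rw [unescA_cons2, if_neg hc, unescB_cons c (nc :: r) hc]
        simp [ih (nc :: r) (by simp; omega)]

theorem unesc_eq (s : List Char) : unescA s = unescB s :=
  unesc_eq_aux s.length s le_rfl

theorem scanA_nil (i : Nat) : scanA [] i = none := by rw [scanA.eq_def]

theorem scanA_cons (c : Char) (rest : List Char) (i : Nat) :
    scanA (c :: rest) i =
      (if c = '\\' then scanA (rest.drop 1) (i + 2)
      else if c = '=' ∨ c = ':' then some (i, c)
      else if PySem.Chars.isspace c then some (i, ' ')
      else scanA rest (i + 1)) := by
  rw [scanA.eq_def]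

theorem scanB_nil (i : Nat) : scanB [] i = none := by
  rw [scanB.eq_def]
  simp [List.idxOf?_nil]

theorem scanB_bs (rest : List Char) (i : Nat) :
    scanB ('\\' :: rest) i = scanB (rest.drop 1) (i + 2) := by
  rw [scanB.eq_def]
  have hseg : ('\\' :: rest).takeWhile (fun c => decide ¬c = '\\') = [] := by simp
  have hm : (pvSepWs.filterMap
      (fun d => (('\\' :: rest).takeWhile (fun c => decide ¬c = '\\')).idxOf? d)).min? = none := by
    rw [hseg]; simp [List.idxOf?_nil]
  simp only [hm]
  have hdw : ('\\' :: rest).dropWhile (fun c => decide ¬c = '\\') = '\\' :: rest := by simp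
  split
  next heq => rw [hdw] at heq; cases heq
  next x r heq =>
    rw [hdw] at heq
    injection heq with e1 e2
    subst e2
    rw [hseg]
    simp

theorem scanB_sep (c : Char) (rest : List Char) (i : Nat) (hc : c ∈ pvSepWs) :
    scanB (c :: rest) i = some (i, if c = '=' ∨ c = ':' then c else ' ') := by
  have hcb : c ≠ '\\' := by intro h; subst h; revert hc; decide
  have hseg : (c :: rest).takeWhile (fun c => decide ¬c = '\\')
      = c :: rest.takeWhile (fun c => decide ¬c = '\\') := by simp [hcb]
  have h0 : (0 : Nat) ∈ pvSepWs.filterMap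
      (fun d => ((c :: rest).takeWhile (fun c => decide ¬c = '\\')).idxOf? d) := by
    refine List.mem_filterMap.mpr ⟨c, hc, ?_⟩
    rw [hseg]; simp [List.idxOf?_cons]
  rw [scanB.eq_def]
  simp only [ne_eq]
  rw [min?_zero h0]
  simp only [hseg]
  simp [List.getD_cons_zero]

theorem scanB_skip (c : Char) (rest : List Char) (i : Nat) (h1 : c ≠ '\\') (h2 : c ∉ pvSepWs) :
    scanB (c :: rest) i = scanB rest (i + 1) := by
  have hseg : (c :: rest).takeWhile (fun c => decide ¬c = '\\')
      = c :: rest.takeWhile (fun c => decide ¬c = '\\') := by simp [h1]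
  have hmap : pvSepWs.filterMap
        (fun d => ((c :: rest).takeWhile (fun c => decide ¬c = '\\')).idxOf? d)
      = (pvSepWs.filterMap
        (fun d => (rest.takeWhile (fun c => decide ¬c = '\\')).idxOf? d)).map (· + 1) := by
    rw [List.map_filterMap]
    refine List.filterMap_congr ?_
    intro d hd
    have hdc : (c == d) = false := beq_eq_false_iff_ne.mpr (fun h => h2 (h ▸ hd))
    rw [hseg]
    simp [List.idxOf?_cons, hdc]
  have hdwc : (c :: rest).dropWhile (fun c => decide ¬c = '\\')
      = rest.dropWhile (fun c => decide ¬c = '\\') := by simp [h1]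
  rw [scanB.eq_def]
  conv_rhs => rw [scanB.eq_def]
  simp only [ne_eq]
  rw [hmap, min?_map_succ]
  cases hm : (pvSepWs.filterMap
      (fun d => (rest.takeWhile (fun c => decide ¬c = '\\')).idxOf? d)).min? with
  | some m =>
    simp only [hm, Option.map_some, hseg, List.getD_cons_succ]
    have harith : i + (m + 1) = i + 1 + m := by omega
    rw [harith]| none =>
    simp only [hm, Option.map_none]
    split
    next heq =>
      rw [hdwc] at heq
      split
      next heq2 => rfl
      next x2 r2 heq2 => rw [heq] at heq2; cases heq2
    next x r heq =>
      rw [hdwc] at heq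
      split
      next heq2 => rw [heq] at heq2; cases heq2
      next x2 r2 heq2 =>
        rw [heq] at heq2
        injection heq2 with e1 e2
        subst e2
        rw [hseg]
        congr 1
        simp
        omega

theorem dom_sepws (c : Char) (h : pvDomChar c = true) :
    c ∈ pvSepWs ↔ (c = '=' ∨ c = ':' ∨ PySem.Chars.isspace c = true) := by
  simp only [pvDomChar, Bool.or_eq_true, Bool.and_eq_true, decide_eq_true_eq, beq_iff_eq] at h
  simp only [pvSepWs, List.mem_cons, List.not_mem_nil, or_false, PySem.Chars.isspace,
    Bool.or_eq_true, Bool.and_eq_true, decide_eq_true_eq, Char.ext_iff, UInt32.ext_iff]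
  have h61 : ('=' : Char).val.toNat = 61 := by decide
  have h58 : ((':' : Char)).val.toNat = 58 := by decide
  have h32 : ((' ' : Char)).val.toNat = 32 := by decide
  have h9 : (('\t' : Char)).val.toNat = 9 := by decide
  have h10 : (('\n' : Char)).val.toNat = 10 := by decide
  have h13 : (('\r' : Char)).val.toNat = 13 := by decide
  have h11 : (('\x0b' : Char)).val.toNat = 11 := by decide
  have h12 : (('\x0c' : Char)).val.toNat = 12 := by decide
  have h28 : (('\x1c' : Char)).val.toNat = 28 := by decide
  have h29 : (('\x1d' : Char)).val.toNat = 29 := by decide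
  have h30 : (('\x1e' : Char)).val.toNat = 30 := by decide
  have h31 : (('\x1f' : Char)).val.toNat = 31 := by decide
  rw [h61, h58, h32, h9, h10, h13, h11, h12, h28, h29, h30, h31]
  unfold Char.toNat at h ⊢
  omega

theorem scan_eq_aux : ∀ (n : Nat) (s : List Char) (i : Nat), s.length ≤ n →
    (∀ c ∈ s, pvDomChar c = true) → scanA s i = scanB s i := by
  intro n
  induction n with
  | zero =>
    intro s i hs _
    have h0 : s = [] := by cases s <;> simp_all
    subst h0
    rw [scanA_nil, scanB_nil]
  | succ n ih =>
    intro s i hs hdom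
    match s with
    | [] => rw [scanA_nil, scanB_nil]
    | c :: rest =>
      simp only [List.length_cons] at hs
      rw [scanA_cons]
      by_cases hc : c = '\\'
      · subst hc
        rw [if_pos rfl, scanB_bs]
        refine ih (rest.drop 1) (i + 2) (by simp; omega) ?_
        intro d hd
        exact hdom d (List.mem_cons_of_mem _ (List.drop_subset 1 rest hd))
      · have hdc := hdom c (List.mem_cons_self ..)
        by_cases he : c = '=' ∨ c = ':'
        · have hsep : c ∈ pvSepWs :=
            (dom_sepws c hdc).mpr (he.elim Or.inl (fun h => Or.inr (Or.inl h)))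
          rw [scanB_sep c rest i hsep]
          rw [if_neg hc, if_pos he, if_pos he]
        · by_cases hsp : PySem.Chars.isspace c = true
          · have hsep : c ∈ pvSepWs := (dom_sepws c hdc).mpr (Or.inr (Or.inr hsp))
            rw [scanB_sep c rest i hsep]
            rw [if_neg hc, if_neg he, if_pos hsp, if_neg he]
          · have hsep : c ∉ pvSepWs := by
              intro hmem
              rcases (dom_sepws c hdc).mp hmem with h1 | h1 | h1
              · exact he (Or.inl h1)
              · exact he (Or.inr h1)
              · exact hsp h1
            rw [if_neg hc, if_neg he, if_neg hsp, scanB_skip c rest i hc hsep]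
            refine ih rest (i + 1) (by omega) ?_
            intro d hd
            exact hdom d (List.mem_cons_of_mem _ hd)

theorem scan_eq (s : List Char) (h : ∀ c ∈ s, pvDomChar c = true) (i : Nat) :
    scanA s i = scanB s i :=
  scan_eq_aux s.length s i le_rfl h

-- ===== VERDICT (by name: the statement is the Claim_ definition above) =====
theorem parse_property_line_py_spec : Claim_equal_parse_property_line_py := by
  intro line hdom
  unfold Spec_parse_property_line_py
  have hchars : ∀ c ∈ line.toList, pvDomChar c = true := by
    intro c hc
    unfold Dom_parse_property_line_py pvDomStr at hdom
    exact List.all_eq_true.mp hdom c hc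
  simp only [parse_property_line_py, parse_property_line_py_alt,
    scan_eq line.toList hchars, unesc_eq]
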